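-- pv_equiv track=rewrite | github.com/raleighlittles/CoderByte-Exercises | Questions Marks.py | QuestionsMarks
-- ===== SOURCE A (Python) =====
-- def QuestionsMarks(strParam):
--
--   # Iterate through the characters.
--   # If a digit is found, store it as the first digit
--   # Then keep track of the number of '?'s seen
--   # If another digit is then seen, check that its sum with the first digit is 10
--
--   first_digit, second_digit = -1, -1
--   num_question_marks_seen = 0
--   target_sum = 10
--   good_pair_found = False
--
--   for ch in strParam:
--     if ch.isnumeric():
--       if (first_digit == -1):
--         first_digit = ch
--
--       elif (second_digit == -1):
--         # Second digit is found
--         second_digit = ch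
--
--     else: # String isn't a number.
--       if ((ch == "?") and (first_digit != -1)):
--         # Remember we only care about question marks found BETWEEN numbers.
--         # if a question mark occurs in the search string before any number, disregard it
--         num_question_marks_seen += 1
--
--     # Both numbers are already set, so check their sums.
--     # By now you should've already seen 3 question marks
--     if (first_digit != -1) and (second_digit != -1):
--       if (int(first_digit) + int(second_digit) == target_sum):
--         # Must be exactly 3 question marks by this point
--         if (num_question_marks_seen == 3):
--           good_pair_found = True
--
--         else:
--           return "false"
--
--
--       # Move forward the values -- the second digit becomes the first
--       first_digit = second_digit
--       second_digit = -1
--       num_question_marks_seen = 0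
--
--   # Reached the end of the string. Check if you're in the 'middle' of finding a pair
--   # in which case, the answer would be false
--   return "true" if good_pair_found else "false"
-- ===== SOURCE B (Python) =====
-- def QuestionsMarks(strParam):
--   # Two phases: build (digit, '?'-count since previous digit) pairs, then scan adjacent pairs.
--   pairs = []
--   q = 0
--   seen = False
--   for ch in strParam:
--     if ch.isnumeric():
--       pairs.append((int(ch), q))
--       q = 0
--       seen = True
--     elif ch == "?" and seen:
--       q += 1
--   good = False
--   for (a, _), (b, qb) in zip(pairs, pairs[1:]):
--     if a + b == 10:
--       if qb == 3:
--         good = True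
--       else:
--         return "false"
--   return "true" if good else "false"
-- ===== Notes on version B (the rewrite author's own statement) =====
-- stated objective: simpler
-- what changed: Replaces A's four-variable single-pass state machine (first/second digit sentinels, in-loop pair shifting, early return) by two plain phases: one scan building a list of (digit, question-marks-since-previous-digit) pairs, then a scan over adjacent pairs.
import Mathlib
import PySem

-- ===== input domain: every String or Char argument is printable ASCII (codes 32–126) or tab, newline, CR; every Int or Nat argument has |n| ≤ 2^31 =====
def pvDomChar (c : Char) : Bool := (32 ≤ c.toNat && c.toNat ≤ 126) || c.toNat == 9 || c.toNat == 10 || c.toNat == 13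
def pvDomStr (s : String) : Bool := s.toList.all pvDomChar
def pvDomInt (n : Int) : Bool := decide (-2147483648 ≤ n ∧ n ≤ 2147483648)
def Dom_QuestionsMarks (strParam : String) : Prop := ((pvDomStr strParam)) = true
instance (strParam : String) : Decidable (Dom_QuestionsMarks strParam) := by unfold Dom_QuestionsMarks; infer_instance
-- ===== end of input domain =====

-- B replaces A's four-variable single-loop state machine by two phases: build the
-- (digit, question-marks-since-previous-digit) list, then scan adjacent pairs (objective: simpler).

-- On the ASCII domain, Python's ch.isnumeric() coincides with Char.isDigit, and
-- int(ch) on a digit char is its value (ch.toNat - 48); both ports use these, exact on Dom.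
def pvDigitVal (ch : Char) : Int := (ch.toNat : Int) - 48

-- ===== PORT A =====
-- literal transliteration of A's loop: state = (first_digit, second_digit, num_question_marks_seen, good_pair_found)
def QuestionsMarksLoopA : List Char → Int → Int → Int → Bool → String
  | [], _fd, _sd, _q, good => if good then "true" else "false"
  | ch :: rest, fd, sd, q, good =>
    let st :=
      if ch.isDigit then
        (if fd == -1 then (pvDigitVal ch, sd, q)
         else if sd == -1 then (fd, pvDigitVal ch, q)
         else (fd, sd, q))
      else
        (fd, sd, if ch == '?' && fd != -1 then q + 1 else q)
    match st with
    | (fd1, sd1, q1) =>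
      if fd1 != -1 && sd1 != -1 then
        if fd1 + sd1 == 10 then
          if q1 == 3 then QuestionsMarksLoopA rest sd1 (-1) 0 true
          else "false"
        else QuestionsMarksLoopA rest sd1 (-1) 0 good
      else QuestionsMarksLoopA rest fd1 sd1 q1 good

def QuestionsMarks (strParam : String) : String :=
  QuestionsMarksLoopA strParam.toList (-1) (-1) 0 false

-- ===== PORT B =====
-- phase 1 of Source B: one scan producing (digit, '?'-count since previous digit) pairs
def QuestionsMarksPairsB : List Char → Int → Bool → List (Int × Int)
  | [], _q, _seen => []
  | ch :: rest, q, seen =>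
    if ch.isDigit then (pvDigitVal ch, q) :: QuestionsMarksPairsB rest 0 true
    else if ch == '?' && seen then QuestionsMarksPairsB rest (q + 1) seen
    else QuestionsMarksPairsB rest q seen

-- phase 2 of Source B: scan adjacent pairs (zip(pairs, pairs[1:]))
def QuestionsMarksScanB : List (Int × Int) → Bool → String
  | [], good => if good then "true" else "false"
  | [_], good => if good then "true" else "false"
  | (a, _) :: (b, qb) :: rest, good =>
    if a + b == 10 then
      if qb == 3 then QuestionsMarksScanB ((b, qb) :: rest) true
      else "false"
    else QuestionsMarksScanB ((b, qb) :: rest) good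

def QuestionsMarks_alt (strParam : String) : String :=
  QuestionsMarksScanB (QuestionsMarksPairsB strParam.toList 0 false) false

-- ===== PRECONDITION & SPEC =====
def Spec_QuestionsMarks (strParam : String) (out : String) : Prop := out = QuestionsMarks_alt strParam
instance (strParam : String) (out : String) : Decidable (Spec_QuestionsMarks strParam out) := by unfold Spec_QuestionsMarks; infer_instance

-- ===== CLAIM (what is proved, stated in full; the proofs are below) =====
def Claim_equal_QuestionsMarks : Prop := ∀ (strParam : String), Dom_QuestionsMarks strParam → Spec_QuestionsMarks strParam (QuestionsMarks strParam)

-- ===== LEMMAS AND PROOFS =====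

theorem pvDigitVal_nonneg (ch : Char) (h : ch.isDigit = true) : 0 ≤ pvDigitVal ch := by
  unfold Char.isDigit at h
  simp only [Bool.and_eq_true, decide_eq_true_eq, UInt32.le_iff_toNat_le] at h
  have h0 : ('0'.val.toNat) = 48 := rfl
  unfold pvDigitVal Char.toNat
  omega

-- main invariant: once a first digit fd (≥ 0, so ≠ -1) is held and no second digit,
-- A's loop equals B's scan over (fd, x) consed onto the pairs of the rest
theorem qm_main (l : List Char) : ∀ (fd q x : Int) (good : Bool), 0 ≤ fd →
    QuestionsMarksLoopA l fd (-1) q good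
      = QuestionsMarksScanB ((fd, x) :: QuestionsMarksPairsB l q true) good := by
  induction l with
  | nil =>
    intro fd q x good _
    simp [QuestionsMarksLoopA, QuestionsMarksPairsB, QuestionsMarksScanB]
  | cons ch rest ih =>
    intro fd q x good hfd
    have hfdne : (fd == -1) = false := by simp; omega
    by_cases hc : ch.isDigit = true
    · have hdv := pvDigitVal_nonneg ch hc
      have hdvne : (pvDigitVal ch != -1) = true := by simp; omega
      simp only [QuestionsMarksLoopA, QuestionsMarksPairsB, hc, if_true, hfdne,
        Bool.false_eq_true, if_false]
      have h2 : (fd != -1 && pvDigitVal ch != -1) = true := by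
        simp; constructor <;> omega
      simp only [beq_self_eq_true, if_true]
      simp only [h2, if_true]
      by_cases hs : (fd + pvDigitVal ch == 10) = true
      · simp only [hs, if_true]
        by_cases hq : (q == 3) = true
        · simp only [hq, if_true, ih _ _ q _ hdv]
          simp [QuestionsMarksScanB, hs, hq]
        · simp only [Bool.not_eq_true] at hq
          simp [QuestionsMarksScanB, hs, hq]
      · simp only [Bool.not_eq_true] at hs
        simp only [hs, Bool.false_eq_true, if_false, ih _ _ q _ hdv]
        simp [QuestionsMarksScanB, hs]
    · simp only [Bool.not_eq_true] at hc
      have hfdne' : (fd != -1) = true := by simp; omega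
      simp only [QuestionsMarksLoopA, QuestionsMarksPairsB, hc, Bool.false_eq_true, if_false,
        hfdne', Bool.and_true]
      by_cases hq : (ch == '?') = true
      · simp [hq, ih _ _ x _ hfd]
      · simp only [Bool.not_eq_true] at hq
        simp [hq, ih _ _ x _ hfd]

-- starting phase, before the first digit: fd = -1, q = 0
theorem qm_start (l : List Char) : ∀ (good : Bool),
    QuestionsMarksLoopA l (-1) (-1) 0 good
      = QuestionsMarksScanB (QuestionsMarksPairsB l 0 false) good := by
  induction l with
  | nil => intro good; simp [QuestionsMarksLoopA, QuestionsMarksPairsB, QuestionsMarksScanB]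
  | cons ch rest ih =>
    intro good
    by_cases hc : ch.isDigit = true
    · have hdv := pvDigitVal_nonneg ch hc
      have hdvne : (pvDigitVal ch != -1) = true := by simp; omega
      simp only [QuestionsMarksLoopA, QuestionsMarksPairsB, hc, if_true]
      simp only [show ((-1 : Int) == -1) = true from rfl, if_true]
      simp [qm_main rest (pvDigitVal ch) 0 0 good hdv]
    · simp only [Bool.not_eq_true] at hc
      simp [QuestionsMarksLoopA, QuestionsMarksPairsB, hc, ih]

-- ===== VERDICT (by name: the statement is the Claim_ definition above) =====
theorem QuestionsMarks_spec : Claim_equal_QuestionsMarks := by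
  intro s _
  unfold Spec_QuestionsMarks QuestionsMarks QuestionsMarks_alt
  exact qm_start s.toList false
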